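-- pv_equiv track=rewrite | github.com/Wilhelm2/MobileNetworks | simulationInitilization/hypercube.py | calculArretesHypercube
-- ===== SOURCE A (Python) =====
-- def calculArretesHypercube(dimension):
--     tab = []
--     if (dimension == 1):
--         tab.append((0,1))
--     elif (dimension == 2):
--         for i in range(0,4):
--             tab.append((i,(i+1)%4))
--     else:
--
--         for i in range(0,4):
--             tab.append((i,(i+1)%4))
--         for d in range(3, dimension+1):
--             nbNodes = pow(2, d-1)
--             tab2 =[]
--             for i in range(len(tab)):
--                 tab2.append((tab[i][0]+nbNodes, tab[i][1]+nbNodes))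
--             for i in range(nbNodes):
--                 tab2.append((i, nbNodes+i))
--             tab = tab + tab2
--     return tab
-- ===== SOURCE B (Python) =====
-- def calculArretesHypercube(dimension):
--     if dimension == 1:
--         return [(0, 1)]
--     if dimension <= 2:
--         return [(0, 1), (1, 2), (2, 3), (3, 0)]
--     prev = calculArretesHypercube(dimension - 1)
--     n = 2 ** (dimension - 1)
--     return (prev
--             + [(u + n, v + n) for (u, v) in prev]
--             + [(i, n + i) for i in range(n)])
-- ===== Notes on version B (the rewrite author's own statement) =====
-- stated objective: simpler
-- what changed: Replaces A's iterative doubling loop with index-based copying (tab2 built by indexing tab[i]) by a direct recursion on the dimension: prev edges, the shifted copy via a comprehension over the edge pairs, then the connector edges.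
import Mathlib
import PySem

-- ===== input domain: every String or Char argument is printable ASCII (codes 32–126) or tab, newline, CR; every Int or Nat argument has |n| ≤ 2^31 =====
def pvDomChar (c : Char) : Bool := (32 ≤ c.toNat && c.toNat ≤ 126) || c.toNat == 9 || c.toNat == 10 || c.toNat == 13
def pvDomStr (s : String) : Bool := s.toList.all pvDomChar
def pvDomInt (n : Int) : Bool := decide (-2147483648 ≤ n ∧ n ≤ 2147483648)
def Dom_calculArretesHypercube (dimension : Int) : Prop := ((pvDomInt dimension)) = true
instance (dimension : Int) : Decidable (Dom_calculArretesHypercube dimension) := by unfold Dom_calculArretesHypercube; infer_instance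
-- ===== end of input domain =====

-- B replaces A's iterative doubling loop by direct recursion on the dimension (same edges, same order); objective: simpler.

-- ===== PORT A =====
-- the initial 4-cycle built by A's `for i in range(0,4): tab.append((i,(i+1)%4))`
def hcCycle : List (Int × Int) :=
  (PySem.List.pyRange 0 4).foldl (fun tab i => tab ++ [(i, PySem.Int.mod (i + 1) 4)]) []

-- one iteration of A's `for d in range(3, dimension+1)` loop body
def hcStep (tab : List (Int × Int)) (d : Int) : List (Int × Int) :=
  let nbNodes : Int := 2 ^ (d - 1).toNat  -- pow(2, d-1); the loop only reaches d ≥ 3, so d-1 ≥ 0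
  let tab2 := (PySem.List.pyRange 0 (PySem.List.len tab)).foldl
      (fun t2 i => t2 ++ [((PySem.List.pyGetD tab i (0, 0)).1 + nbNodes,
                           (PySem.List.pyGetD tab i (0, 0)).2 + nbNodes)]) []
  let tab2 := (PySem.List.pyRange 0 nbNodes).foldl (fun t2 i => t2 ++ [(i, nbNodes + i)]) tab2
  tab ++ tab2

def calculArretesHypercube (dimension : Int) : List (Int × Int) :=
  if dimension = 1 then [(0, 1)]
  else if dimension = 2 then hcCycle
  else (PySem.List.pyRange 3 (dimension + 1)).foldl hcStep hcCycle

-- ===== PORT B =====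
def calculArretesHypercube_alt (dimension : Int) : List (Int × Int) :=
  if dimension = 1 then [(0, 1)]
  else if dimension ≤ 2 then [(0, 1), (1, 2), (2, 3), (3, 0)]
  else
    let prev := calculArretesHypercube_alt (dimension - 1)
    let n : Int := 2 ^ (dimension - 1).toNat  -- 2 ** (dimension - 1); dimension ≥ 3 here
    prev ++ prev.map (fun p => (p.1 + n, p.2 + n))
         ++ (PySem.List.pyRange 0 n).map (fun i => (i, n + i))
termination_by dimension.toNat
decreasing_by omega

-- ===== PRECONDITION & SPEC =====
def Spec_calculArretesHypercube (dimension : Int) (out : List (Int × Int)) : Prop := out = calculArretesHypercube_alt dimension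
instance (dimension : Int) (out : List (Int × Int)) : Decidable (Spec_calculArretesHypercube dimension out) := by unfold Spec_calculArretesHypercube; infer_instance

-- ===== CLAIM (what is proved, stated in full; the proofs are below) =====
def Claim_equal_calculArretesHypercube : Prop := ∀ (dimension : Int), Dom_calculArretesHypercube dimension → Spec_calculArretesHypercube dimension (calculArretesHypercube dimension)

-- ===== LEMMAS AND PROOFS =====

-- one loop iteration of A equals one unfolding of B's recursion
lemma hcStep_eq (tab : List (Int × Int)) (d : Int) :
    hcStep tab d =
      tab ++ tab.map (fun p => (p.1 + 2 ^ (d - 1).toNat, p.2 + 2 ^ (d - 1).toNat))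
          ++ (PySem.List.pyRange 0 ((2 : Int) ^ (d - 1).toNat)).map
              (fun i => (i, 2 ^ (d - 1).toNat + i)) := by
  unfold hcStep
  dsimp only
  rw [PySem.List.foldl_append_singleton_eq_map, PySem.List.foldl_append_singleton_eq_map]
  have h : (PySem.List.pyRange 0 (PySem.List.len tab)).map
      (fun i => ((PySem.List.pyGetD tab i ((0 : Int), (0 : Int))).1 + 2 ^ (d - 1).toNat,
                 (PySem.List.pyGetD tab i ((0, 0))).2 + 2 ^ (d - 1).toNat))
      = tab.map (fun p => (p.1 + 2 ^ (d - 1).toNat, p.2 + 2 ^ (d - 1).toNat)) := by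
    conv_rhs => rw [← PySem.List.map_pyGetD_pyRange_zero tab ((0 : Int), (0 : Int))]
    rw [List.map_map]
    rfl
  rw [h]
  simp only [List.nil_append, List.append_assoc]

-- A's doubling loop, run up to dimension 2 + k, equals B's recursion there
lemma hc_loop_eq (k : Nat) :
    (PySem.List.pyRange 3 ((2 : Int) + k + 1)).foldl hcStep hcCycle
      = calculArretesHypercube_alt (2 + k) := by
  induction k with
  | zero =>
      have h0 : ((2 : Int) + (0 : Nat) + 1) = 3 := by norm_num
      have h0' : ((2 : Int) + (0 : Nat)) = 2 := by norm_num
      rw [h0, h0', calculArretesHypercube_alt]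
      decide
  | succ k ih =>
      rw [show ((2 : Int) + ((k + 1 : Nat)) + 1) = (2 + (k : Int) + 1) + 1 by push_cast; ring,
          show ((2 : Int) + ((k + 1 : Nat))) = (2 + (k : Int) + 1) by push_cast; ring]
      rw [PySem.List.pyRange_one_succ_right (by omega), List.foldl_append]
      simp only [List.foldl_cons, List.foldl_nil, ih]
      rw [hcStep_eq]
      conv_rhs => rw [calculArretesHypercube_alt]
      rw [if_neg (show ¬((2 : Int) + k + 1 = 1) by omega),
          if_neg (show ¬((2 : Int) + k + 1 ≤ 2) by omega),
          show (2 : Int) + k + 1 - 1 = 2 + k by ring]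

-- ===== VERDICT (by name: the statement is the Claim_ definition above) =====
theorem calculArretesHypercube_spec : Claim_equal_calculArretesHypercube := by
  intro dimension _
  unfold Spec_calculArretesHypercube calculArretesHypercube
  by_cases h1 : dimension = 1
  · rw [h1, if_pos rfl, calculArretesHypercube_alt]
    decide
  · by_cases h2 : dimension ≤ 2
    · have h4 : PySem.List.pyRange 3 (dimension + 1) = [] := by
        simp [PySem.List.pyRange]; omega
      have h5 : calculArretesHypercube_alt dimension = [(0, 1), (1, 2), (2, 3), (3, 0)] := by
        rw [calculArretesHypercube_alt]; simp [h1, h2]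
      rw [h5, if_neg h1]
      by_cases h3 : dimension = 2
      · rw [if_pos h3]; decide
      · rw [if_neg h3, h4, List.foldl_nil]; decide
    · have hk : ∃ k : Nat, dimension = 2 + (k : Int) ∧ 1 ≤ k := by
        refine ⟨(dimension - 2).toNat, by omega, by omega⟩
      obtain ⟨k, hd, _⟩ := hk
      rw [if_neg h1, if_neg (show ¬ dimension = 2 by omega)]
      rw [hd]
      exact hc_loop_eq k
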